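-- pv_equiv track=rewrite | github.com/CuteReimu/maplebot | maplebot/commands/star_force.py | _get_boom_star
-- ===== SOURCE A (Python) =====
-- def _get_boom_star(cur_star: int, new_system: bool) -> int:
--     if not new_system:
--         return 12
--     pairs = [(15, 12), (20, 15), (21, 17), (23, 19), (26, 20)]
--     for threshold, result in reversed(pairs):
--         if cur_star >= threshold:
--             return result
--     return 12
-- ===== SOURCE B (Python) =====
-- def _get_boom_star(cur_star: int, new_system: bool) -> int:
--     if not new_system:
--         return 12
--     thresholds = [15, 20, 21, 23, 26]
--     results = [12, 15, 17, 19, 20]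
--     # binary search: idx = bisect_right(thresholds, cur_star)
--     lo, hi = 0, len(thresholds)
--     while lo < hi:
--         mid = (lo + hi) // 2
--         if cur_star < thresholds[mid]:
--             hi = mid
--         else:
--             lo = mid + 1
--     return 12 if lo == 0 else results[lo - 1]
-- ===== Notes on version B (the rewrite author's own statement) =====
-- stated objective: alternative
-- what changed: Replaces the linear reverse scan over (threshold,result) pairs with a hand-rolled bisect_right binary search over a sorted thresholds list plus a parallel results list.
import Mathlib
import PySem

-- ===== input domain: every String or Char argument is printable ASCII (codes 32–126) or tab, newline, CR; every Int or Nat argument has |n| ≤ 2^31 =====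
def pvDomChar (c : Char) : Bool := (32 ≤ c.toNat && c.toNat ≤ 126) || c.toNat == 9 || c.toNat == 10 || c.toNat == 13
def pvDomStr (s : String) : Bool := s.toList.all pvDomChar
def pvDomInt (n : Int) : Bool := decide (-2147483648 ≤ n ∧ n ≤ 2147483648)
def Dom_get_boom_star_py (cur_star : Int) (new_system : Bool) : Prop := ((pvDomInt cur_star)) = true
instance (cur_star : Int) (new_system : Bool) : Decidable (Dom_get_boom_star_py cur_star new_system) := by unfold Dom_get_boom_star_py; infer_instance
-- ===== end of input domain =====

-- B replaces A's linear reverse scan of the pair table with a bisect_right binary search over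
-- a sorted thresholds list and a parallel results list (alternative structure, same outputs).

-- ===== PORT A =====
-- the 'for threshold, result in reversed(pairs): if cur_star >= threshold: return result' loop
def pvScanRev (cur_star : Int) : List (Int × Int) → Int
  | [] => 12
  | (threshold, result) :: rest =>
      if cur_star ≥ threshold then result else pvScanRev cur_star rest

def get_boom_star_py (cur_star : Int) (new_system : Bool) : Int :=
  if ¬ new_system then 12
  else
    let pairs : List (Int × Int) := [(15, 12), (20, 15), (21, 17), (23, 19), (26, 20)]
    pvScanRev cur_star pairs.reverse

-- ===== PORT B =====
-- the while lo < hi binary-search loop of Source B; thresholds[mid] is always in range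
-- (0 ≤ lo ≤ mid < hi ≤ 5), so List.getD is exact here.
def pvBisect (cur_star : Int) (thresholds : List Int) (lo hi : Nat) : Nat :=
  if h : lo < hi then
    let mid := (lo + hi) / 2
    if cur_star < thresholds.getD mid 0 then pvBisect cur_star thresholds lo mid
    else pvBisect cur_star thresholds (mid + 1) hi
  else lo
termination_by hi - lo
decreasing_by all_goals omega

def get_boom_star_py_alt (cur_star : Int) (new_system : Bool) : Int :=
  if ¬ new_system then 12
  else
    let thresholds : List Int := [15, 20, 21, 23, 26]
    let results : List Int := [12, 15, 17, 19, 20]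
    let lo := pvBisect cur_star thresholds 0 thresholds.length
    if lo == 0 then 12 else results.getD (lo - 1) 0

-- ===== PRECONDITION & SPEC =====
def Spec_get_boom_star_py (cur_star : Int) (new_system : Bool) (out : Int) : Prop := out = get_boom_star_py_alt cur_star new_system
instance (cur_star : Int) (new_system : Bool) (out : Int) : Decidable (Spec_get_boom_star_py cur_star new_system out) := by unfold Spec_get_boom_star_py; infer_instance

-- ===== CLAIM (what is proved, stated in full; the proofs are below) =====
def Claim_equal_get_boom_star_py : Prop := ∀ (cur_star : Int) (new_system : Bool), Dom_get_boom_star_py cur_star new_system → Spec_get_boom_star_py cur_star new_system (get_boom_star_py cur_star new_system)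

-- ===== LEMMAS AND PROOFS =====

-- ===== VERDICT (by name: the statement is the Claim_ definition above) =====
theorem get_boom_star_py_spec : Claim_equal_get_boom_star_py := by
  intro cur_star new_system _
  unfold Spec_get_boom_star_py get_boom_star_py get_boom_star_py_alt
  cases new_system with
  | false => simp
  | true =>
    simp only [List.reverse_cons, List.reverse_nil, List.nil_append,
      List.cons_append, pvScanRev, List.length_cons, List.length_nil]
    unfold pvBisect
    unfold pvBisect
    unfold pvBisect
    unfold pvBisect
    norm_num
    split_ifs <;> first | rfl | (norm_num; omega)
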